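-- pv_equiv track=rewrite | github.com/wuallenwu/arm-bench | scripts/fix_candidate_guards.py | find_inner_loop_close
-- ===== SOURCE A (Python) =====
-- def find_inner_loop_close(lines: list[str], start_idx: int) -> int | None:
--     """
--     Starting at the line containing `static void inner_loop_NNN`, track brace
--     depth and return the index of the line containing the closing `}`.
--     """
--     depth = 0
--     found_open = False
--     for i in range(start_idx, len(lines)):
--         depth += lines[i].count("{") - lines[i].count("}")
--         if "{" in lines[i]:
--             found_open = True
--         if found_open and depth == 0:
--             return i
--     return None
-- ===== SOURCE B (Python) =====
-- def find_inner_loop_close(lines: list[str], start_idx: int) -> int | None: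
--     """Table-based re-implementation: materialize per-line brace deltas and
--     open-brace flags for the scanned index range, take running depth sums,
--     locate the offset of the first line containing '{', then return the first
--     position at or after it whose cumulative depth is zero."""
--     idxs = range(start_idx, len(lines))
--     deltas = [lines[i].count("{") - lines[i].count("}") for i in idxs]
--     opens = [("{" in lines[i]) for i in idxs]
--     cum = []
--     s = 0
--     for d in deltas:
--         s += d
--         cum.append(s)
--     first_open = None
--     for k, o in enumerate(opens):
--         if o:
--             first_open = k
--             break
--     if first_open is None:
--         return None
--     for k, c in enumerate(cum):
--         if k >= first_open and c == 0:
--             return start_idx + k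
--     return None
-- ===== Notes on version B (the rewrite author's own statement) =====
-- stated objective: alternative
-- what changed: Replaces A's single stateful scan (running depth + found_open latch + early return) by a table-based decomposition: materialize per-line brace deltas and open flags, prefix-sum the deltas, find the first-open offset, then scan the cumulative table for the first zero depth at or after it.
import Mathlib
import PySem

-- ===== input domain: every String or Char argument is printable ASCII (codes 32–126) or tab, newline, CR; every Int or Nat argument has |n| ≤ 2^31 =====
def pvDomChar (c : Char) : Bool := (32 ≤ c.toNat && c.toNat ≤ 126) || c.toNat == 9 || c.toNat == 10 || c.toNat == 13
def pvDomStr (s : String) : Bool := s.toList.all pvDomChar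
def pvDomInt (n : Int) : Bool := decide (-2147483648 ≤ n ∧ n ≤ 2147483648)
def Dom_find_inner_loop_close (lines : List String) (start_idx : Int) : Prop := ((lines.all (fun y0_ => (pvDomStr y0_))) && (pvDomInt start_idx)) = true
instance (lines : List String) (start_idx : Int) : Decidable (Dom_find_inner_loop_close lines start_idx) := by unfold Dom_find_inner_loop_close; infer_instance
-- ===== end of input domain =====

-- B replaces A's single stateful scan by a table-based decomposition (deltas, prefix sums,
-- first-open offset, then a scan of the table); same cost, return values proved equal on Pre_.

-- ===== PORT A =====
-- A's loop 'for i in range(start_idx, len(lines))' with state (depth, found_open) and early return.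
def pvAloop (lines : List String) : List Int → Int → Bool → Option Int
  | [], _, _ => none
  | i :: rest, depth, found =>
    let s := PySem.List.pyGetD lines i ""
    let depth' := depth + ((PySem.Str.count s "{" : Int) - (PySem.Str.count s "}" : Int))
    let found' := found || PySem.Str.isIn "{" s
    if found' && depth' == 0 then some i else pvAloop lines rest depth' found'

def find_inner_loop_close (lines : List String) (start_idx : Int) : Option Int :=
  pvAloop lines (PySem.List.pyRange start_idx (lines.length : Int) 1) 0 false

-- ===== PORT B =====
-- running sums:  for d in deltas: s += d; cum.append(s)
def pvBcum : List Int → Int → List Int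
  | [], _ => []
  | d :: ds, s => (s + d) :: pvBcum ds (s + d)

-- for k, o in enumerate(opens): if o: first_open = k; break
def pvBfirstOpen : List Bool → Nat → Option Nat
  | [], _ => none
  | o :: os, k => if o then some k else pvBfirstOpen os (k + 1)

-- for k, c in enumerate(cum): if k >= first_open and c == 0: return start_idx + k
def pvBscan (fo : Nat) (start : Int) : List Int → Nat → Option Int
  | [], _ => none
  | c :: cs, k => if fo ≤ k && c == 0 then some (start + (k : Int)) else pvBscan fo start cs (k + 1)

def find_inner_loop_close_alt (lines : List String) (start_idx : Int) : Option Int :=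
  let idxs := PySem.List.pyRange start_idx (lines.length : Int) 1
  let deltas := idxs.map (fun i =>
    ((PySem.Str.count (PySem.List.pyGetD lines i "") "{" : Int)
      - (PySem.Str.count (PySem.List.pyGetD lines i "") "}" : Int)))
  let opens := idxs.map (fun i => PySem.Str.isIn "{" (PySem.List.pyGetD lines i ""))
  let cum := pvBcum deltas 0
  match pvBfirstOpen opens 0 with
  | none => none
  | some fo => pvBscan fo start_idx cum 0

-- ===== PRECONDITION & SPEC =====
-- Pre_ excludes exactly the inputs where Python A raises IndexError (start_idx below -len(lines),
-- where lines[i] is read with an index before the start of the list); B raises there too.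
def Pre_find_inner_loop_close (lines : List String) (start_idx : Int) : Prop :=
  -(lines.length : Int) ≤ start_idx
instance (lines : List String) (start_idx : Int) : Decidable (Pre_find_inner_loop_close lines start_idx) := by unfold Pre_find_inner_loop_close; infer_instance

def pvWitness_find_inner_loop_close : List String × Int := (["void f() {", "  x;", "}"], 0)

def Spec_find_inner_loop_close (lines : List String) (start_idx : Int) (out : Option Int) : Prop := out = find_inner_loop_close_alt lines start_idx
instance (lines : List String) (start_idx : Int) (out : Option Int) : Decidable (Spec_find_inner_loop_close lines start_idx out) := by unfold Spec_find_inner_loop_close; infer_instance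

-- ===== CLAIM (what is proved, stated in full; the proofs are below) =====
def Claim_equal_find_inner_loop_close : Prop := ∀ (lines : List String) (start_idx : Int), Dom_find_inner_loop_close lines start_idx → Pre_find_inner_loop_close lines start_idx → Spec_find_inner_loop_close lines start_idx (find_inner_loop_close lines start_idx)

-- ===== LEMMAS AND PROOFS =====

-- abbreviations used only by the proofs
def pvOpens (lines : List String) (a : Int) : List Bool :=
  (PySem.List.pyRange a (lines.length : Int) 1).map
    (fun i => PySem.Str.isIn "{" (PySem.List.pyGetD lines i ""))

def pvDeltas (lines : List String) (a : Int) : List Int :=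
  (PySem.List.pyRange a (lines.length : Int) 1).map (fun i =>
    ((PySem.Str.count (PySem.List.pyGetD lines i "") "{" : Int)
      - (PySem.Str.count (PySem.List.pyGetD lines i "") "}" : Int)))

-- the scan ignores which admissible first-open bound it got, once past both
lemma pvBscan_shift (start : Int) (cs : List Int) : ∀ (fo fo' m : Nat), fo ≤ m → fo' ≤ m →
    pvBscan fo start cs m = pvBscan fo' start cs m := by
  induction cs with
  | nil => intro fo fo' m _ _; rfl
  | cons c cs ih =>
    intro fo fo' m h h'
    simp only [pvBscan, h, h', decide_true, Bool.true_and]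
    split
    · rfl
    · exact ih fo fo' (m + 1) (by omega) (by omega)

lemma pvBfirstOpen_ge : ∀ (os : List Bool) (m fo : Nat), pvBfirstOpen os m = some fo → m ≤ fo := by
  intro os
  induction os with
  | nil => intro m fo h; simp [pvBfirstOpen] at h
  | cons o os ih =>
    intro m fo h
    by_cases ho : o = true
    · simp [pvBfirstOpen, ho] at h; omega
    · simp only [pvBfirstOpen, if_neg ho] at h
      have := ih (m + 1) fo h; omega

-- main invariant, both latch states at once: A's loop over range(a, len) with state
-- (depth, found) equals the table-based search at offset k (a = start + k)
lemma pv_key (lines : List String) (start : Int) :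
    ∀ (n : Nat) (a depth : Int) (k : Nat), a = start + (k : Int) →
    ((lines.length : Int) - a).toNat = n →
    (pvAloop lines (PySem.List.pyRange a (lines.length : Int) 1) depth true =
       pvBscan k start (pvBcum (pvDeltas lines a) depth) k)
    ∧ (pvAloop lines (PySem.List.pyRange a (lines.length : Int) 1) depth false =
       (match pvBfirstOpen (pvOpens lines a) k with
        | none => none
        | some fo => pvBscan fo start (pvBcum (pvDeltas lines a) depth) k)) := by
  intro n
  induction n with
  | zero =>
    intro a depth k hk hn
    have hnil : PySem.List.pyRange a (lines.length : Int) 1 = [] :=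
      PySem.List.pyRange_one_eq_nil (by omega)
    constructor
    · rw [hnil]; simp [pvAloop, pvBcum, pvDeltas, hnil, pvBscan]
    · rw [hnil]; simp [pvAloop, pvOpens, hnil, pvBfirstOpen]
  | succ n ih =>
    intro a depth k hk hn
    have hab : a < (lines.length : Int) := by omega
    have hcons := PySem.List.pyRange_one_cons (b := (lines.length : Int)) hab
    have hiha := ih (a + 1) (depth + ((PySem.Str.count (PySem.List.pyGetD lines a "") "{" : Int)
      - (PySem.Str.count (PySem.List.pyGetD lines a "") "}" : Int))) (k + 1)
      (by push_cast; omega) (by omega)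
    have hD : pvDeltas lines a =
        ((PySem.Str.count (PySem.List.pyGetD lines a "") "{" : Int)
          - (PySem.Str.count (PySem.List.pyGetD lines a "") "}" : Int)) :: pvDeltas lines (a + 1) := by
      rw [pvDeltas, pvDeltas, hcons, List.map_cons]
    have hO : pvOpens lines a =
        PySem.Str.isIn "{" (PySem.List.pyGetD lines a "") :: pvOpens lines (a + 1) := by
      rw [pvOpens, pvOpens, hcons, List.map_cons]
    rw [hcons, hD, hO]
    simp only [pvAloop, pvBcum]
    generalize hDg : ((PySem.Str.count (PySem.List.pyGetD lines a "") "{" : Int)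
      - (PySem.Str.count (PySem.List.pyGetD lines a "") "}" : Int)) = D
    generalize hOg : PySem.Str.isIn "{" (PySem.List.pyGetD lines a "") = O
    rw [hDg] at hiha
    have hk' : (decide (k ≤ k)) = true := by simp
    have hkk : a = start + (k : Int) := hk
    constructor
    · -- found_open already true before this line
      simp only [Bool.true_or, Bool.true_and, pvBscan, hk', Bool.true_and]
      by_cases hz : (depth + D == 0) = true
      · rw [if_pos hz, if_pos hz, hkk]
      · rw [if_neg hz, if_neg hz, hiha.1]
        exact pvBscan_shift start _ (k + 1) k (k + 1) (by omega) (by omega)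
    · -- found_open still false: case on whether this line opens a brace
      simp only [Bool.false_or, pvBfirstOpen]
      cases O with
      | true =>
        rw [if_pos rfl]
        simp only [Bool.true_and, pvBscan, hk', Bool.true_and]
        by_cases hz : (depth + D == 0) = true
        · rw [if_pos hz, if_pos hz, hkk]
        · rw [if_neg hz, if_neg hz, hiha.1]
          exact pvBscan_shift start _ (k + 1) k (k + 1) (by omega) (by omega)
      | false =>
        rw [if_neg (by simp)]
        rw [if_neg (by simp), hiha.2]
        cases hfo' : pvBfirstOpen (pvOpens lines (a + 1)) (k + 1) with
        | none => rfl
        | some fo =>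
          have hge := pvBfirstOpen_ge _ _ _ hfo'
          simp only [pvBscan]
          rw [if_neg (by simp; omega)]

-- ===== VERDICT (by name: the statement is the Claim_ definition above) =====
theorem find_inner_loop_close_spec : Claim_equal_find_inner_loop_close := by
  intro lines start_idx _ _
  unfold Spec_find_inner_loop_close find_inner_loop_close find_inner_loop_close_alt
  exact (pv_key lines start_idx ((lines.length : Int) - start_idx).toNat start_idx 0 0
    (by simp) rfl).2
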